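-- pv_equiv track=rewrite | github.com/writetozealdefense-svg/SSRF-Explorer | ssrf_explorer/enumeration/enumerator.py | _in_scope
-- ===== SOURCE A (Python) =====
-- from typing import Dict, Iterable, List, Tuple
--
-- def _in_scope(host: str, scope: Iterable[str]) -> bool:
--     if not scope:
--         return True
--     for s in scope:
--         if not s:
--             continue
--         if host == s or host.endswith("." + s):
--             return True
--     return False
-- ===== SOURCE B (Python) =====
-- def _in_scope(host, scope):
--     if not scope:
--         return True
--     scope_set = {s for s in scope if s}
--     if host in scope_set:
--         return True
--     for i, ch in enumerate(host):
--         if ch == '.' and host[i + 1:] in scope_set: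
--             return True
--     return False
-- ===== Notes on version B (the rewrite author's own statement) =====
-- stated objective: idiomatic
-- what changed: B builds a set of the non-empty scope entries once and tests host and each dot-delimited suffix of host against it, instead of A's per-entry equality/endswith scan over scope.
import Mathlib
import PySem

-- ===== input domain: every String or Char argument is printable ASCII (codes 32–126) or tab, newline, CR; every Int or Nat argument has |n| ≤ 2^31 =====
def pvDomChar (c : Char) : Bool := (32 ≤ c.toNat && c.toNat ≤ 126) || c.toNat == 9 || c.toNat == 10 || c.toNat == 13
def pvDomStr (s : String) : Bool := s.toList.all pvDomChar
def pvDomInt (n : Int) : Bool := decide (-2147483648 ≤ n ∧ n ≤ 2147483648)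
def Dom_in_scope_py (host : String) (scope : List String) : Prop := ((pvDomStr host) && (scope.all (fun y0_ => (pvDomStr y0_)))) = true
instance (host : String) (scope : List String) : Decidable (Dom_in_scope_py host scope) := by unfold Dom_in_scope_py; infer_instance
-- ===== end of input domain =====

-- B replaces A's per-entry equality/endswith scan by one prebuilt set of the non-empty
-- scope entries, matched against host and each dot-delimited suffix of host (idiomatic).

-- ===== PORT A =====
-- the 'for s in scope' loop of A
def aScanLoop (host : String) : List String → Bool
  | [] => false
  | s :: rest =>
    if s = "" then aScanLoop host rest
    else if host = s || PySem.Str.endswith host ("." ++ s) then true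
    else aScanLoop host rest

def in_scope_py (host : String) (scope : List String) : Bool :=
  if scope.isEmpty then true else aScanLoop host scope

-- ===== PORT B =====
-- the 'for i, ch in enumerate(host)' loop of B: at each '.', test the suffix after it
def bSuffixLoop (st : PySem.Set String) : List Char → Bool
  | [] => false
  | c :: rest =>
    if c = '.' && PySem.Set.contains st (String.ofList rest) then true
    else bSuffixLoop st rest

def in_scope_py_alt (host : String) (scope : List String) : Bool :=
  if scope.isEmpty then true
  else
    let scopeSet : PySem.Set String := PySem.Set.ofList (scope.filter (fun s => s ≠ ""))
    if PySem.Set.contains scopeSet host then true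
    else bSuffixLoop scopeSet host.toList

-- ===== PRECONDITION & SPEC =====
def Spec_in_scope_py (host : String) (scope : List String) (out : Bool) : Prop := out = in_scope_py_alt host scope
instance (host : String) (scope : List String) (out : Bool) : Decidable (Spec_in_scope_py host scope out) := by unfold Spec_in_scope_py; infer_instance

-- ===== CLAIM (what is proved, stated in full; the proofs are below) =====
def Claim_equal_in_scope_py : Prop := ∀ (host : String) (scope : List String), Dom_in_scope_py host scope → Spec_in_scope_py host scope (in_scope_py host scope)

-- ===== LEMMAS AND PROOFS =====

theorem aScanLoop_iff (host : String) (L : List String) :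
    aScanLoop host L = true ↔
      ∃ s ∈ L, s ≠ "" ∧ (host = s ∨ PySem.Str.endswith host ("." ++ s) = true) := by
  induction L with
  | nil => simp [aScanLoop]
  | cons s rest ih =>
    simp only [aScanLoop]
    split_ifs with h1 h2
    · simp [ih, h1]
    · simp only [Bool.or_eq_true, decide_eq_true_eq] at h2
      simp only [true_iff]
      exact ⟨s, List.mem_cons_self .., h1, h2⟩
    · simp only [Bool.or_eq_true, decide_eq_true_eq] at h2
      simp only [ih, List.mem_cons]
      constructor
      · rintro ⟨t, ht, h⟩; exact ⟨t, .inr ht, h⟩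
      · rintro ⟨t, htm, h⟩
        rcases htm with rfl | ht
        · exact absurd h.2 h2
        · exact ⟨t, ht, h⟩

theorem bSuffixLoop_iff (st : PySem.Set String) (l : List Char) :
    bSuffixLoop st l = true ↔
      ∃ pre suf, l = pre ++ '.' :: suf ∧ String.ofList suf ∈ st := by
  induction l with
  | nil =>
    simp only [bSuffixLoop, Bool.false_eq_true, false_iff]
    rintro ⟨pre, suf, h, -⟩
    simp at h
  | cons c rest ih =>
    simp only [bSuffixLoop]
    split_ifs with h
    · simp only [Bool.and_eq_true, decide_eq_true_eq, PySem.Set.contains_iff] at h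
      simp only [true_iff]
      exact ⟨[], rest, by simp [h.1], h.2⟩
    · simp only [Bool.and_eq_true, decide_eq_true_eq, PySem.Set.contains_iff] at h
      rw [ih]
      constructor
      · rintro ⟨pre, suf, rfl, hm⟩; exact ⟨c :: pre, suf, rfl, hm⟩
      · rintro ⟨pre, suf, heq, hm⟩
        cases pre with
        | nil =>
          simp only [List.nil_append, List.cons.injEq] at heq
          exact absurd ⟨heq.1, heq.2 ▸ hm⟩ h
        | cons d pre' =>
          simp only [List.cons_append, List.cons.injEq] at heq
          exact ⟨pre', suf, heq.2, hm⟩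

theorem endswith_dot_iff (host s : String) :
    PySem.Str.endswith host ("." ++ s) = true ↔
      ∃ pre, host.toList = pre ++ '.' :: s.toList := by
  rw [PySem.Str.endswith_eq, PySem.Chars.endswith_iff]
  constructor
  · rintro ⟨pre, h⟩
    exact ⟨pre, by simpa [String.toList_append] using h.symm⟩
  · rintro ⟨pre, h⟩
    exact ⟨pre, by simpa [String.toList_append] using h.symm⟩

-- ===== VERDICT (by name: the statement is the Claim_ definition above) =====
theorem in_scope_py_spec : Claim_equal_in_scope_py := by
  intro host scope _
  unfold Spec_in_scope_py in_scope_py in_scope_py_alt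
  cases h : scope.isEmpty
  · simp only [Bool.false_eq_true, if_false]
    have key : aScanLoop host scope =
        (PySem.Set.contains (PySem.Set.ofList (scope.filter (fun s => s ≠ ""))) host
          || bSuffixLoop (PySem.Set.ofList (scope.filter (fun s => s ≠ ""))) host.toList) := by
      rw [Bool.eq_iff_iff, aScanLoop_iff, Bool.or_eq_true, PySem.Set.contains_iff,
        PySem.Set.mem_ofList, bSuffixLoop_iff, List.mem_filter]
      constructor
      · rintro ⟨s, hs, hne, hcase | hcase⟩
        · exact .inl (hcase ▸ ⟨hs, by simpa using hne⟩)
        · obtain ⟨pre, hpre⟩ := (endswith_dot_iff host s).1 hcase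
          refine .inr ⟨pre, s.toList, hpre, ?_⟩
          rw [PySem.Set.mem_ofList, List.mem_filter]
          simpa using ⟨hs, hne⟩
      · rintro (⟨hm, hne⟩ | ⟨pre, suf, hpre, hm⟩)
        · exact ⟨host, hm, by simpa using hne, .inl rfl⟩
        · rw [PySem.Set.mem_ofList, List.mem_filter] at hm
          refine ⟨String.ofList suf, hm.1, by simpa using hm.2, .inr ?_⟩
          exact (endswith_dot_iff host (String.ofList suf)).2 ⟨pre, by simpa using hpre⟩
    rw [key]
    cases PySem.Set.contains (PySem.Set.ofList (scope.filter (fun s => s ≠ ""))) host <;> simp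
  · simp
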